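-- pv_equiv track=rewrite | github.com/SorenKF/cueties | cue_system/N_cue_feature_engineering.py | shape
-- ===== SOURCE A (Python) =====
-- def shape(token):
--     '''
--     Takes token (str), and returns str of shape.
--
--     Get short shape of token.
--     lower = x
--     upper = X
--     digit = d
--     other = o
--     i.e
--     cats -> x
--     Cats -> Xx
--     USoA -> XxX
--     1999 -> d
--     13dec19 -> dxd
--     U.S.A -> XoXoXo
--     '''
--
--     # Create empty list to store shape symbols in
--     shape_list = []
--
--     # To prevent breaking on NaN values
--     if type(token) != str:
--         shape = 'o'
--         return shape
--
--     # Loop over every character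
--     for character in token:
--         # If token is NaN
--
--
--         # For any character except for first (swapped with other if statement for faster computing)
--         if len(shape_list) > 0:
--             # If the character is upper case, and the previous shape symbol is not upper,
--             # set shape symbol to 'X'
--             if character.isupper() and shape_list[-1] != 'X':
--                 shape_character = 'X'
--             elif character.islower() and shape_list[-1] != 'x':
--                 shape_character = 'x'
--             elif character.isdigit() and shape_list[-1] != 'd':
--                 shape_character = 'd'
--             # If character is not upper, lower or digit (and the previous symbol is 'o')
--             elif not any([character.isupper(), character.islower(), character.isdigit(),
--                          shape_list[-1] == 'o']):
--                 shape_character = 'o'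
--             # If not the case (ie previous was upper and so is this one), continue to next character
--             else:
--                 continue
--
--         # For first character
--         else:
--             if character.isupper():
--                 shape_character = 'X'
--             elif character.islower():
--                 shape_character = 'x'
--             elif character.isdigit():
--                 shape_character = 'd'
--             elif not any([character.isupper(), character.islower(), character.isdigit()]):
--                 shape_character = 'o'
--             else:
--                 continue
--
--         shape_list.append(shape_character)
--
--     shape = ''.join(shape_list)
--     return shape
-- ===== SOURCE B (Python) =====
-- def _cls(character):
--     if character.isupper():
--         return 'X'
--     if character.islower():
--         return 'x'
--     if character.isdigit():
--         return 'd'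
--     return 'o'
--
--
-- def shape(token):
--     # To prevent breaking on NaN values
--     if type(token) != str:
--         return 'o'
--     return _shape_rec(token)
--
--
-- def _shape_rec(s):
--     # Divide and conquer: the shape of a string is the merge of the shapes
--     # of its two halves, dropping the first symbol of the right shape when
--     # it equals the last symbol of the left shape.
--     if len(s) <= 1:
--         return ''.join(_cls(c) for c in s)
--     mid = len(s) // 2
--     left = _shape_rec(s[:mid])
--     right = _shape_rec(s[mid:])
--     if left and right and left[-1] == right[0]:
--         right = right[1:]
--     return left + right
-- ===== Notes on version B (the rewrite author's own statement) =====
-- stated objective: alternative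
-- what changed: Replaces A's single left-to-right pass that inspects shape_list[-1] with a divide-and-conquer recursion: the shape of a string is the shape of its left half merged with the shape of its right half, dropping the right shape's first symbol when it equals the left shape's last symbol.
import Mathlib
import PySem

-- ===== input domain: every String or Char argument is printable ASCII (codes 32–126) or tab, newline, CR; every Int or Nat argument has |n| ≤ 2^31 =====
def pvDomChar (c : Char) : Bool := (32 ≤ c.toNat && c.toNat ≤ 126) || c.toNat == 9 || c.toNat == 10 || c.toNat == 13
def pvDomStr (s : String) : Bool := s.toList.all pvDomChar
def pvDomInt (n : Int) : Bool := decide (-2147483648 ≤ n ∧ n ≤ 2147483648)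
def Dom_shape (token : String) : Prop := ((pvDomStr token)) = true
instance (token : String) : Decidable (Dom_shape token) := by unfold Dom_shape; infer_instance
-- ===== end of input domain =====

-- B computes the shape by divide and conquer (merge the shapes of the two halves,
-- dropping the right half's first symbol when it equals the left half's last symbol)
-- instead of A's single pass inspecting shape_list[-1]; objective: alternative algorithm.
-- The `type(token) != str` guard of A can never fire under the type convention (token : String).

-- ===== PORT A =====
-- one iteration of A's for-loop over `token`; shape_list[-1] is getLast! (the branch is
-- guarded by len(shape_list) > 0, so the list is nonempty there)
def shapeStep (shapeList : List Char) (character : Char) : List Char :=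
  if shapeList.length > 0 then
    if PySem.Chars.isupper character && shapeList.getLast! != 'X' then shapeList ++ ['X']
    else if PySem.Chars.islower character && shapeList.getLast! != 'x' then shapeList ++ ['x']
    else if PySem.Chars.isdigit character && shapeList.getLast! != 'd' then shapeList ++ ['d']
    else if !(PySem.Chars.isupper character || PySem.Chars.islower character ||
              PySem.Chars.isdigit character || shapeList.getLast! == 'o') then shapeList ++ ['o']
    else shapeList  -- `continue`
  else
    if PySem.Chars.isupper character then shapeList ++ ['X']
    else if PySem.Chars.islower character then shapeList ++ ['x']
    else if PySem.Chars.isdigit character then shapeList ++ ['d']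
    else if !(PySem.Chars.isupper character || PySem.Chars.islower character ||
              PySem.Chars.isdigit character) then shapeList ++ ['o']
    else shapeList  -- `continue` (unreachable)

def shape (token : String) : String :=
  -- `if type(token) != str: return 'o'` can never fire (token : String)
  String.mk (token.toList.foldl shapeStep [])

-- ===== PORT B =====
-- _cls
def classifyChar (c : Char) : Char :=
  if PySem.Chars.isupper c then 'X'
  else if PySem.Chars.islower c then 'x'
  else if PySem.Chars.isdigit c then 'd'
  else 'o'

-- the merge of the two half-shapes (the three lines after the recursive calls in _shape_rec)
def mergeShape (left right : List Char) : List Char :=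
  left ++ (if left ≠ [] ∧ right ≠ [] ∧ left.getLast! = right.head! then right.tail else right)

-- _shape_rec, on the character list (s[:mid] / s[mid:] = take / drop)
def shapeRec (cs : List Char) : List Char :=
  if h : cs.length ≤ 1 then cs.map classifyChar
  else mergeShape (shapeRec (cs.take (cs.length / 2))) (shapeRec (cs.drop (cs.length / 2)))
termination_by cs.length
decreasing_by
  · simp only [List.length_take]; omega
  · simp only [List.length_drop]; omega

def shape_alt (token : String) : String :=
  String.mk (shapeRec token.toList)

-- ===== PRECONDITION & SPEC =====
def Spec_shape (token : String) (out : String) : Prop := out = shape_alt token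
instance (token : String) (out : String) : Decidable (Spec_shape token out) := by unfold Spec_shape; infer_instance

-- ===== CLAIM =====
def Claim_equal_shape : Prop := ∀ (token : String), Dom_shape token → Spec_shape token (shape token)

-- ===== LEMMAS AND PROOFS =====

-- canonical form: collapse adjacent equal symbols
def groupKeys (prev : Char) : List Char → List Char
  | [] => []
  | c :: rest => if c = prev then groupKeys prev rest else c :: groupKeys c rest

def dedupC : List Char → List Char
  | [] => []
  | c :: rest => c :: groupKeys c rest

theorem upper_not_lower {c : Char} (h : PySem.Chars.isupper c = true) :
    PySem.Chars.islower c = false := by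
  revert h
  simp [PySem.Chars.isupper, PySem.Chars.islower, Char.le_def, UInt32.le_iff_toNat_le]
  omega

theorem upper_not_digit {c : Char} (h : PySem.Chars.isupper c = true) :
    PySem.Chars.isdigit c = false := by
  revert h
  simp [PySem.Chars.isupper, PySem.Chars.isdigit, Char.le_def, UInt32.le_iff_toNat_le]
  omega

theorem lower_not_digit {c : Char} (h : PySem.Chars.islower c = true) :
    PySem.Chars.isdigit c = false := by
  revert h
  simp [PySem.Chars.islower, PySem.Chars.isdigit, Char.le_def, UInt32.le_iff_toNat_le]
  omega

theorem shapeStep_nil (c : Char) : shapeStep [] c = [classifyChar c] := by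
  by_cases hu : PySem.Chars.isupper c = true <;>
  by_cases hl : PySem.Chars.islower c = true <;>
  by_cases hd : PySem.Chars.isdigit c = true <;>
  simp_all [shapeStep, classifyChar]

theorem shapeStep_cons (acc : List Char) (c : Char) (h : acc ≠ []) :
    shapeStep acc c =
      if acc.getLast! = classifyChar c then acc else acc ++ [classifyChar c] := by
  have hlen : acc.length > 0 := List.length_pos_iff.mpr h
  by_cases hu : PySem.Chars.isupper c = true
  · have hl := upper_not_lower hu
    have hd := upper_not_digit hu
    by_cases hp : acc.getLast! = 'X' <;> simp [shapeStep, classifyChar, hlen, hu, hl, hd]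
  · by_cases hl : PySem.Chars.islower c = true
    · have hd := lower_not_digit hl
      by_cases hp : acc.getLast! = 'x' <;> simp [shapeStep, classifyChar, hlen, hu, hl, hd]
    · by_cases hd : PySem.Chars.isdigit c = true
      · by_cases hp : acc.getLast! = 'd' <;> simp [shapeStep, classifyChar, hlen, hu, hl, hd]
      · by_cases hp : acc.getLast! = 'o' <;> simp [shapeStep, classifyChar, hlen, hu, hl, hd]

theorem getLast!_concat (acc : List Char) (x : Char) : (acc ++ [x]).getLast! = x := by
  cases h : acc ++ [x] with
  | nil => simp at h
  | cons a as => simp [List.getLast!, ← h]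

-- A's fold equals the canonical collapse
theorem foldl_shapeStep (cs : List Char) : ∀ (acc : List Char), acc ≠ [] →
    List.foldl shapeStep acc cs = acc ++ groupKeys acc.getLast! (cs.map classifyChar) := by
  induction cs with
  | nil => intro acc _; simp [groupKeys]
  | cons c rest ih =>
    intro acc h
    rw [List.map_cons, List.foldl_cons, shapeStep_cons acc c h, groupKeys]
    by_cases hc : acc.getLast! = classifyChar c
    · rw [if_pos hc, if_pos hc.symm]
      exact ih acc h
    · rw [if_neg hc, if_neg (fun e => hc e.symm),
        ih (acc ++ [classifyChar c]) (by simp), getLast!_concat]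
      simp [List.append_assoc]

theorem shape_eq_dedupC (token : String) :
    shape token = String.mk (dedupC (token.toList.map classifyChar)) := by
  unfold shape
  cases h : token.toList with
  | nil => simp [dedupC]
  | cons c rest =>
    have hl : [classifyChar c].getLast! = classifyChar c := getLast!_concat [] (classifyChar c)
    rw [List.foldl_cons, shapeStep_nil, foldl_shapeStep rest [classifyChar c] (by simp), hl]
    simp [dedupC]

theorem getLast!_cons_cons (a b : Char) (l : List Char) :
    (a :: b :: l).getLast! = (b :: l).getLast! := by
  simp [List.getLast!]

theorem groupKeys_append (xs : List Char) : ∀ (prev : Char) (ys : List Char),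
    groupKeys prev (xs ++ ys) =
      groupKeys prev xs ++ groupKeys ((prev :: groupKeys prev xs).getLast!) ys := by
  induction xs with
  | nil => intro prev ys; simp [groupKeys, List.getLast!]
  | cons c xs' ih =>
    intro prev ys
    simp only [List.cons_append, groupKeys]
    by_cases hc : c = prev
    · rw [if_pos hc, if_pos hc, ih prev ys]
    · rw [if_neg hc, if_neg hc, ih c ys, getLast!_cons_cons]
      simp

theorem dedupC_ne_nil {xs : List Char} (h : xs ≠ []) : dedupC xs ≠ [] := by
  cases xs with
  | nil => exact absurd rfl h
  | cons c r => simp [dedupC]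

theorem dedupC_append (xs ys : List Char) (hx : xs ≠ []) (hy : ys ≠ []) :
    dedupC (xs ++ ys) =
      dedupC xs ++ (if (dedupC xs).getLast! = (dedupC ys).head!
                    then (dedupC ys).tail else dedupC ys) := by
  cases xs with
  | nil => exact absurd rfl hx
  | cons a xs' =>
    cases ys with
    | nil => exact absurd rfl hy
    | cons b ys' =>
      simp only [dedupC, List.cons_append, List.head!, List.tail]
      rw [groupKeys_append xs' a (b :: ys')]
      simp only [groupKeys]
      by_cases hb : b = (a :: groupKeys a xs').getLast!
      · rw [if_pos hb, if_pos hb.symm, hb]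
      · rw [if_neg hb, if_neg (fun e => hb e.symm)]

theorem shapeRec_eq_aux (n : Nat) : ∀ (cs : List Char), cs.length ≤ n →
    shapeRec cs = dedupC (cs.map classifyChar) := by
  induction n with
  | zero =>
    intro cs h
    have : cs = [] := List.length_eq_zero_iff.mp (Nat.le_zero.mp h)
    subst this
    rw [shapeRec]
    simp [dedupC]
  | succ n ih =>
    intro cs h
    rw [shapeRec]
    by_cases h1 : cs.length ≤ 1
    · rw [dif_pos h1]
      match cs, h1 with
      | [], _ => simp [dedupC]
      | [c], _ => simp [dedupC, groupKeys]
    · rw [dif_neg h1]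
      rw [Nat.not_le] at h1
      set mid := cs.length / 2 with hmid
      have hm1 : 1 ≤ mid := by omega
      have hm2 : mid < cs.length := by omega
      have htake : (cs.take mid).length = mid := by simp; omega
      have hdrop : (cs.drop mid).length = cs.length - mid := by simp
      have htn : cs.take mid ≠ [] := by
        intro e; rw [e] at htake; simp at htake; omega
      have hdn : cs.drop mid ≠ [] := by
        intro e; rw [e] at hdrop; simp at hdrop; omega
      rw [ih (cs.take mid) (by omega), ih (cs.drop mid) (by omega)]
      have hsplit : cs.map classifyChar =
          (cs.take mid).map classifyChar ++ (cs.drop mid).map classifyChar := by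
        rw [← List.map_append, List.take_append_drop]
      rw [hsplit, dedupC_append _ _ (by simpa using htn) (by simpa using hdn)]
      unfold mergeShape
      have hLn := dedupC_ne_nil (xs := (cs.take mid).map classifyChar) (by simpa using htn)
      have hRn := dedupC_ne_nil (xs := (cs.drop mid).map classifyChar) (by simpa using hdn)
      by_cases hc : (dedupC ((cs.take mid).map classifyChar)).getLast! =
          (dedupC ((cs.drop mid).map classifyChar)).head!
      · rw [if_pos hc, if_pos ⟨hLn, hRn, hc⟩]
      · rw [if_neg hc, if_neg (by intro ⟨_, _, e⟩; exact hc e)]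

-- ===== VERDICT =====
theorem shape_spec : Claim_equal_shape := by
  intro token _
  unfold Spec_shape shape_alt
  rw [shape_eq_dedupC, shapeRec_eq_aux token.toList.length token.toList (le_refl _)]
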